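-- pv_equiv track=rewrite | github.com/harshalms/python | basics/nobel_int.py | solve
-- ===== SOURCE A (Python) =====
-- def solve(A):
--     A.sort()
--     nobel = {}
--     A.sort()
--     for i in range(len(A)):
--         if A[i] == len(A)-i-1:
--             if i == len(A)-1:
--                 return 1
--             elif A[i] < A[i+1]:
--                 return 1
--             else:
--                 return -1
--     return -1
-- ===== SOURCE B (Python) =====
-- def solve(A):
--     # sort in place ascending (same mutation as A), then binary-search the
--     # unique index i with A[i] == n-i-1 (A[i]-(n-i-1) is strictly increasing)
--     A.sort()
--     n = len(A)
--     lo, hi = 0, n - 1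
--     while lo <= hi:
--         mid = (lo + hi) // 2
--         g = A[mid] - (n - mid - 1)
--         if g == 0:
--             if mid == n - 1 or A[mid] < A[mid + 1]:
--                 return 1
--             return -1
--         elif g < 0:
--             lo = mid + 1
--         else:
--             hi = mid - 1
--     return -1
-- ===== Notes on version B (the rewrite author's own statement) =====
-- stated objective: alternative
-- what changed: After the same in-place ascending sort, B replaces A's linear scan over all indices by a binary search for the unique index i with A[i] == n-i-1, exploiting that A[i]-(n-i-1) is strictly increasing on a sorted list; the sort still dominates the cost.
import Mathlib
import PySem

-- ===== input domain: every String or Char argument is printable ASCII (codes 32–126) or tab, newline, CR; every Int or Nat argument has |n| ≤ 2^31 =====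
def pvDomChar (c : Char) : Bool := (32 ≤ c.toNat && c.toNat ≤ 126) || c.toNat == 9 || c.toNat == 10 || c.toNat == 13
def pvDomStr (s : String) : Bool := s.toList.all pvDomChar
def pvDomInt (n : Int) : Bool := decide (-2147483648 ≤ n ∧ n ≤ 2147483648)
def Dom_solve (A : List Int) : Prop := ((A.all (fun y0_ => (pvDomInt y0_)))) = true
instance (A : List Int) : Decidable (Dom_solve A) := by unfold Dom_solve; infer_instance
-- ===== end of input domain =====

-- B replaces A's linear scan (after the same sort) by a binary search for the unique
-- index i with A[i] == n-i-1; both versions sort the argument in place in Python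
-- (same mutation), the equivalence proved here is about the return value.


-- ===== PORT A =====
-- the linear scan 'for i in range(len(A)): …' of A, as structural recursion on i
def solveGo (S : List Int) (i : Nat) : Int :=
  if _h : i < S.length then
    if S.getD i 0 = (S.length : Int) - (i : Int) - 1 then
      if i = S.length - 1 then 1
      else if S.getD i 0 < S.getD (i + 1) 0 then 1
      else -1
    else solveGo S (i + 1)
  else -1
termination_by S.length - i

def solve (A : List Int) : Int :=
  -- A.sort(); nobel = {} (unused); A.sort()
  let S := PySem.List.sorted (PySem.List.sorted A (fun x => x) false) (fun x => x) false
  solveGo S 0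

-- ===== PORT B =====
-- the 'while lo <= hi' binary search of Source B
def bsGo (S : List Int) (n lo hi : Int) : Int :=
  if _h : lo ≤ hi then
    let mid := PySem.Int.floordiv (lo + hi) 2
    let g := S.getD mid.toNat 0 - (n - mid - 1)
    if g = 0 then
      if mid = n - 1 then 1
      else if S.getD mid.toNat 0 < S.getD (mid + 1).toNat 0 then 1
      else -1
    else if g < 0 then bsGo S n (mid + 1) hi
    else bsGo S n lo (mid - 1)
  else -1
termination_by (hi - lo + 1).toNat
decreasing_by
  · have := PySem.Int.floordiv_two_mid_bounds (lo := lo) (hi := hi) _h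
    omega
  · have := PySem.Int.floordiv_two_mid_bounds (lo := lo) (hi := hi) _h
    omega

def solve_alt (A : List Int) : Int :=
  let S := PySem.List.sorted A (fun x => x) false
  bsGo S (S.length : Int) 0 ((S.length : Int) - 1)

-- ===== PRECONDITION & SPEC =====
def Spec_solve (A : List Int) (out : Int) : Prop := out = solve_alt A
instance (A : List Int) (out : Int) : Decidable (Spec_solve A out) := by unfold Spec_solve; infer_instance

-- ===== CLAIM (what is proved, stated in full; the proofs are below) =====
def Claim_equal_solve : Prop := ∀ (A : List Int), Dom_solve A → Spec_solve A (solve A)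

-- ===== LEMMAS AND PROOFS =====

-- "g i" of both programs: value at i minus (n - i - 1)
def gval (S : List Int) (i : Nat) : Int := S.getD i 0 - ((S.length : Int) - (i : Int) - 1)

-- the common tie-break value returned when the matching index z is found
def tie (S : List Int) (z : Nat) : Int :=
  if z = S.length - 1 then 1
  else if S.getD z 0 < S.getD (z + 1) 0 then 1
  else -1

theorem gval_strict_mono (S : List Int) (hs : S = PySem.List.sorted S (fun x => x) false)
    (i j : Nat) (hij : i < j) (hj : j < S.length) : gval S i < gval S j := by
  have hle : S.getD i 0 ≤ S.getD j 0 := by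
    have hi : i < S.length := lt_trans hij hj
    have hp : S.Pairwise (· ≤ ·) := by
      rw [hs]
      exact PySem.List.sorted_pairwise (xs := S) (key := fun x => x)
    rw [List.getD_eq_getElem S 0 hi, List.getD_eq_getElem S 0 hj]
    exact List.pairwise_iff_getElem.mp hp i j hi hj hij
  unfold gval
  have : (i : Int) < (j : Int) := by exact_mod_cast hij
  omega

-- A-side: the scan returns -1 when no index ≥ i matches
theorem solveGo_none (S : List Int) (i : Nat)
    (h : ∀ k, i ≤ k → k < S.length → gval S k ≠ 0) : solveGo S i = -1 := by
  unfold solveGo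
  split
  · next hi =>
    have hne : ¬ (S.getD i 0 = (S.length : Int) - (i : Int) - 1) := by
      have := h i le_rfl hi
      unfold gval at this
      omega
    rw [if_neg hne]
    exact solveGo_none S (i + 1) (fun k hk hk' => h k (by omega) hk')
  · rfl
termination_by S.length - i

-- A-side: the scan starting at i ≤ z returns tie z when z is the unique zero of gval
theorem solveGo_found (S : List Int) (hs : S = PySem.List.sorted S (fun x => x) false)
    (z : Nat) (hz : z < S.length) (hgz : gval S z = 0) (i : Nat) (hi : i ≤ z) :
    solveGo S i = tie S z := by
  unfold solveGo
  rw [dif_pos (lt_of_le_of_lt hi hz)]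
  by_cases hiz : i = z
  · subst hiz
    have : S.getD i 0 = (S.length : Int) - (i : Int) - 1 := by
      unfold gval at hgz; omega
    rw [if_pos this]
    unfold tie
    rfl
  · have hlt : i < z := lt_of_le_of_ne hi hiz
    have hgi : gval S i < 0 := by
      have := gval_strict_mono S hs i z hlt hz
      omega
    have hne : ¬ (S.getD i 0 = (S.length : Int) - (i : Int) - 1) := by
      unfold gval at hgi; omega
    rw [if_neg hne]
    exact solveGo_found S hs z hz hgz (i + 1) (by omega)
termination_by z - i

-- B-side: the binary search returns -1 when gval has no zero at all
theorem bsGo_none (S : List Int) (lo hi : Int) (hlo : 0 ≤ lo)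
    (hhi : hi ≤ (S.length : Int) - 1)
    (h : ∀ k, k < S.length → gval S k ≠ 0) :
    bsGo S (S.length : Int) lo hi = -1 := by
  unfold bsGo
  split
  · next hle =>
    have hmid := PySem.Int.floordiv_two_mid_bounds (lo := lo) (hi := hi) hle
    set mid := PySem.Int.floordiv (lo + hi) 2 with hmdef
    have hmn : mid.toNat < S.length := by omega
    have hcast : (mid.toNat : Int) = mid := by omega
    have hg : S.getD mid.toNat 0 - ((S.length : Int) - mid - 1) ≠ 0 := by
      have := h mid.toNat hmn
      unfold gval at this
      rw [hcast] at this
      exact this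
    rw [if_neg hg]
    split
    · exact bsGo_none S (mid + 1) hi (by omega) hhi h
    · exact bsGo_none S lo (mid - 1) hlo (by omega) h
  · rfl
termination_by (hi - lo + 1).toNat
decreasing_by
  · omega
  · omega

-- B-side: the binary search returns tie z when z is the unique zero of gval, z ∈ [lo, hi]
theorem bsGo_found (S : List Int) (hs : S = PySem.List.sorted S (fun x => x) false)
    (z : Nat) (hz : z < S.length) (hgz : gval S z = 0) (lo hi : Int)
    (hlo : 0 ≤ lo) (hloz : lo ≤ (z : Int)) (hzhi : (z : Int) ≤ hi)
    (hhi : hi ≤ (S.length : Int) - 1) :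
    bsGo S (S.length : Int) lo hi = tie S z := by
  unfold bsGo
  have hle : lo ≤ hi := le_trans hloz hzhi
  rw [dif_pos hle]
  have hmid := PySem.Int.floordiv_two_mid_bounds (lo := lo) (hi := hi) hle
  set mid := PySem.Int.floordiv (lo + hi) 2 with hmdef
  have hmn : mid.toNat < S.length := by omega
  have hcast : (mid.toNat : Int) = mid := by omega
  have hgm : gval S mid.toNat = S.getD mid.toNat 0 - ((S.length : Int) - mid - 1) := by
    unfold gval; rw [hcast]
  by_cases hg0 : S.getD mid.toNat 0 - ((S.length : Int) - mid - 1) = 0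
  · -- found: mid must be z by strict monotonicity
    have hmz : mid.toNat = z := by
      by_contra hne
      rcases Nat.lt_or_ge mid.toNat z with hlt | hge
      · have := gval_strict_mono S hs mid.toNat z hlt hz
        rw [hgm] at this; omega
      · have hlt : z < mid.toNat := lt_of_le_of_ne hge (fun e => hne e.symm)
        have := gval_strict_mono S hs z mid.toNat hlt hmn
        rw [hgm] at this; omega
    rw [if_pos hg0]
    unfold tie
    have hmz' : mid = (z : Int) := by omega
    have h1 : (mid = (S.length : Int) - 1) ↔ (z = S.length - 1) := by omega
    by_cases hlast : z = S.length - 1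
    · rw [if_pos (h1.mpr hlast), if_pos hlast]
    · rw [if_neg (fun c => hlast (h1.mp c)), if_neg hlast]
      have e1 : mid.toNat = z := hmz
      have e2 : (mid + 1).toNat = z + 1 := by omega
      rw [e1, e2]
  · rw [if_neg hg0]
    split
    · next hneg =>
      -- gval mid < 0, so mid < z
      have hmz : mid.toNat < z := by
        by_contra hge
        push Not at hge
        rcases Nat.eq_or_lt_of_le hge with he | hlt
        · rw [he] at hgz; rw [hgm] at hgz; omega
        · have := gval_strict_mono S hs z mid.toNat hlt hmn
          rw [hgm] at this; omega
      exact bsGo_found S hs z hz hgz (mid + 1) hi (by omega) (by omega) hzhi hhi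
    · next hpos =>
      have hmz : z < mid.toNat := by
        by_contra hge
        push Not at hge
        rcases Nat.eq_or_lt_of_le hge with he | hlt
        · rw [← he] at hgz; rw [hgm] at hgz; omega
        · have := gval_strict_mono S hs mid.toNat z hlt hz
          rw [hgm] at this; omega
      exact bsGo_found S hs z hz hgz lo (mid - 1) hlo hloz (by omega) (by omega)
termination_by (hi - lo + 1).toNat
decreasing_by
  · omega
  · omega

-- ===== VERDICT (by name: the statement is the Claim_ definition above) =====
theorem solve_spec : Claim_equal_solve := by
  intro A _
  unfold Spec_solve solve solve_alt
  rw [PySem.List.sorted_sorted]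
  set S := PySem.List.sorted A (fun x => x) false with hSdef
  have hs : S = PySem.List.sorted S (fun x => x) false := by
    rw [hSdef, PySem.List.sorted_sorted]
  by_cases hex : ∃ z, z < S.length ∧ gval S z = 0
  · obtain ⟨z, hz, hgz⟩ := hex
    rw [solveGo_found S hs z hz hgz 0 (Nat.zero_le z),
        bsGo_found S hs z hz hgz 0 ((S.length : Int) - 1) le_rfl
          (by exact_mod_cast Nat.zero_le z) (by omega) le_rfl]
  · push Not at hex
    rw [solveGo_none S 0 (fun k _ hk => hex k hk),
        bsGo_none S 0 ((S.length : Int) - 1) le_rfl le_rfl (fun k hk => hex k hk)]
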